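-- pv_equiv track=rewrite | github.com/rlamprell/compression_and_encoding | examSolutions.py | sets_of_five
-- ===== SOURCE A (Python) =====
-- def sets_of_five(answer, code):
--
--     # decode into 4 groups of five
--     for i in range(len(code)):
--
--         # stop when we reach the end of the 20 questions
--         if 5*i+4 > 19:
--             break
--
--         answer[5*i]     = code[i]
--         answer[5*i+1]   = code[i]
--         answer[5*i+2]   = code[i]
--         answer[5*i+3]   = code[i]
--         answer[5*i+4]   = code[i]
--
--     return answer
-- ===== SOURCE B (Python) =====
-- def sets_of_five(answer, code):
--     # iterate over output positions rather than input groups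
--     n = min(5 * len(code), 20)
--     for k in range(n):
--         answer[k] = code[k // 5]
--     return answer
-- ===== Notes on version B (the rewrite author's own statement) =====
-- stated objective: simpler
-- what changed: Replaces the group loop with its five explicit per-group assignments by a single flat loop over output positions k, writing answer[k] = code[k//5] for k < min(5*len(code), 20).
import Mathlib
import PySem

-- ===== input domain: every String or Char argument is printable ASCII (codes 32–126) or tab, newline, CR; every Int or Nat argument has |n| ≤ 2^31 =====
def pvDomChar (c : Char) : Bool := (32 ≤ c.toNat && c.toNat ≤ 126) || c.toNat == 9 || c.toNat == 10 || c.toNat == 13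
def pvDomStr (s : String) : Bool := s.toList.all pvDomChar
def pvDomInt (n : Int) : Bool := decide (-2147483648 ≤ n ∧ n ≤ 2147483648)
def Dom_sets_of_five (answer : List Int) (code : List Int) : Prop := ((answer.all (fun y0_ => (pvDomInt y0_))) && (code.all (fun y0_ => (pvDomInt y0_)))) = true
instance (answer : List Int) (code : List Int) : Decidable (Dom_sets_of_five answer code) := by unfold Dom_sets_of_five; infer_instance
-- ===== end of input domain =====

-- B replaces A's group loop (five explicit assignments per code element) by a single flat loop
-- over output positions k < min(5*len(code), 20) writing answer[k] = code[k//5]; objective: simpler.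
-- Both A and B mutate `answer` in place in Python (the same writes, in the same order); the
-- equivalence proved here is about the returned list value.


-- ===== PORT A =====
-- A's for-loop over range(len(code)) with its break, as structural recursion on the index list
def sets_of_five_aux (answer : List Int) (code : List Int) : List Int → List Int
  | [] => answer
  | i :: rest =>
    if 5*i+4 > 19 then answer   -- break
    else
      let a0 := PySem.List.pySetD answer (5*i)   (PySem.List.pyGetD code i 0)
      let a1 := PySem.List.pySetD a0     (5*i+1) (PySem.List.pyGetD code i 0)
      let a2 := PySem.List.pySetD a1     (5*i+2) (PySem.List.pyGetD code i 0)
      let a3 := PySem.List.pySetD a2     (5*i+3) (PySem.List.pyGetD code i 0)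
      let a4 := PySem.List.pySetD a3     (5*i+4) (PySem.List.pyGetD code i 0)
      sets_of_five_aux a4 code rest

def sets_of_five (answer : List Int) (code : List Int) : List Int :=
  sets_of_five_aux answer code (PySem.List.pyRange 0 (code.length : Int) 1)

-- ===== PORT B =====
-- pyGetD is exact here: k // 5 < len(code) for every k < min(5*len(code), 20)
def sets_of_five_alt (answer : List Int) (code : List Int) : List Int :=
  let n : Int := min (5 * (code.length : Int)) 20
  (PySem.List.pyRange 0 n 1).foldl
    (fun a k => PySem.List.pySetD a k (PySem.List.pyGetD code (PySem.Int.floordiv k 5) 0))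
    answer

-- ===== PRECONDITION & SPEC =====
-- Pre_ excludes exactly the inputs on which the Python A raises IndexError: answer shorter than
-- the 5*min(len(code),4) positions written (B raises there too, at the same first index).
def Pre_sets_of_five (answer : List Int) (code : List Int) : Prop :=
  5 * min code.length 4 ≤ answer.length
instance (answer : List Int) (code : List Int) : Decidable (Pre_sets_of_five answer code) := by unfold Pre_sets_of_five; infer_instance

def pvWitness_sets_of_five : List Int × List Int :=
  ([0,0,0,0,0,0,0,0,0,0,0,0,0,0,0,0,0,0,0,0], [1,2,3,4])

def Spec_sets_of_five (answer : List Int) (code : List Int) (out : List Int) : Prop := out = sets_of_five_alt answer code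
instance (answer : List Int) (code : List Int) (out : List Int) : Decidable (Spec_sets_of_five answer code out) := by unfold Spec_sets_of_five; infer_instance

-- ===== CLAIM (what is proved, stated in full; the proofs are below) =====
def Claim_equal_sets_of_five : Prop := ∀ (answer : List Int) (code : List Int), Dom_sets_of_five answer code → Pre_sets_of_five answer code → Spec_sets_of_five answer code (sets_of_five answer code)

-- ===== LEMMAS AND PROOFS =====

-- once index 4 is reached, A's loop breaks immediately (or the remaining range is empty)
lemma aux_from_four (ans code : List Int) (b : Int) :
    sets_of_five_aux ans code (PySem.List.pyRange 4 b 1) = ans := by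
  by_cases h : b ≤ 4
  · rw [PySem.List.pyRange_one_eq_nil h]
    rfl
  · rw [PySem.List.pyRange_one_cons (by omega)]
    simp [sets_of_five_aux]

-- ===== VERDICT (by name: the statement is the Claim_ definition above) =====
theorem sets_of_five_spec : Claim_equal_sets_of_five := by
  intro answer code _ _
  unfold Spec_sets_of_five sets_of_five sets_of_five_alt
  match code with
  | [] => rfl
  | [a] =>
    simp only [List.length_cons, List.length_nil]
    rw [show PySem.List.pyRange 0 (((0+1 : Nat)):Int) 1 = [0] from by decide,
        show min (5*(((0+1 : Nat)):Int)) 20 = 5 from by decide,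
        show PySem.List.pyRange 0 (5:Int) 1 = [0, 1, 2, 3, 4] from by decide]
    simp only [List.foldl, sets_of_five_aux,
      show PySem.Int.floordiv 0 5 = 0 from by decide,
      show PySem.Int.floordiv 1 5 = 0 from by decide,
      show PySem.Int.floordiv 2 5 = 0 from by decide,
      show PySem.Int.floordiv 3 5 = 0 from by decide,
      show PySem.Int.floordiv 4 5 = 0 from by decide,
      ]
    norm_num
  | [a, b] =>
    simp only [List.length_cons, List.length_nil]
    rw [show PySem.List.pyRange 0 (((0+1+1 : Nat)):Int) 1 = [0, 1] from by decide,
        show min (5*(((0+1+1 : Nat)):Int)) 20 = 10 from by decide,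
        show PySem.List.pyRange 0 (10:Int) 1 = [0, 1, 2, 3, 4, 5, 6, 7, 8, 9] from by decide]
    simp only [List.foldl, sets_of_five_aux,
      show PySem.Int.floordiv 0 5 = 0 from by decide,
      show PySem.Int.floordiv 1 5 = 0 from by decide,
      show PySem.Int.floordiv 2 5 = 0 from by decide,
      show PySem.Int.floordiv 3 5 = 0 from by decide,
      show PySem.Int.floordiv 4 5 = 0 from by decide,
      show PySem.Int.floordiv 5 5 = 1 from by decide,
      show PySem.Int.floordiv 6 5 = 1 from by decide,
      show PySem.Int.floordiv 7 5 = 1 from by decide,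
      show PySem.Int.floordiv 8 5 = 1 from by decide,
      show PySem.Int.floordiv 9 5 = 1 from by decide,
      ]
    norm_num
  | [a, b, c] =>
    simp only [List.length_cons, List.length_nil]
    rw [show PySem.List.pyRange 0 (((0+1+1+1 : Nat)):Int) 1 = [0, 1, 2] from by decide,
        show min (5*(((0+1+1+1 : Nat)):Int)) 20 = 15 from by decide,
        show PySem.List.pyRange 0 (15:Int) 1 = [0, 1, 2, 3, 4, 5, 6, 7, 8, 9, 10, 11, 12, 13, 14] from by decide]
    simp only [List.foldl, sets_of_five_aux,
      show PySem.Int.floordiv 0 5 = 0 from by decide,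
      show PySem.Int.floordiv 1 5 = 0 from by decide,
      show PySem.Int.floordiv 2 5 = 0 from by decide,
      show PySem.Int.floordiv 3 5 = 0 from by decide,
      show PySem.Int.floordiv 4 5 = 0 from by decide,
      show PySem.Int.floordiv 5 5 = 1 from by decide,
      show PySem.Int.floordiv 6 5 = 1 from by decide,
      show PySem.Int.floordiv 7 5 = 1 from by decide,
      show PySem.Int.floordiv 8 5 = 1 from by decide,
      show PySem.Int.floordiv 9 5 = 1 from by decide,
      show PySem.Int.floordiv 10 5 = 2 from by decide,
      show PySem.Int.floordiv 11 5 = 2 from by decide,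
      show PySem.Int.floordiv 12 5 = 2 from by decide,
      show PySem.Int.floordiv 13 5 = 2 from by decide,
      show PySem.Int.floordiv 14 5 = 2 from by decide,
      ]
    norm_num
  | a :: b :: c :: d :: t =>
    simp only [List.length_cons]
    have hmin : min (5 * ((t.length + 1 + 1 + 1 + 1 : Nat) : Int)) 20 = 20 := by
      push_cast; omega
    rw [hmin, show PySem.List.pyRange 0 (20:Int) 1 = [0, 1, 2, 3, 4, 5, 6, 7, 8, 9, 10, 11, 12, 13, 14, 15, 16, 17, 18, 19] from by decide,
        PySem.List.pyRange_one_cons (by push_cast; omega), PySem.List.pyRange_one_cons (by push_cast; omega),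
        PySem.List.pyRange_one_cons (by push_cast; omega), PySem.List.pyRange_one_cons (by push_cast; omega)]
    simp only [List.foldl, sets_of_five_aux,
      show PySem.Int.floordiv 0 5 = 0 from by decide,
      show PySem.Int.floordiv 1 5 = 0 from by decide,
      show PySem.Int.floordiv 2 5 = 0 from by decide,
      show PySem.Int.floordiv 3 5 = 0 from by decide,
      show PySem.Int.floordiv 4 5 = 0 from by decide,
      show PySem.Int.floordiv 5 5 = 1 from by decide,
      show PySem.Int.floordiv 6 5 = 1 from by decide,
      show PySem.Int.floordiv 7 5 = 1 from by decide,
      show PySem.Int.floordiv 8 5 = 1 from by decide,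
      show PySem.Int.floordiv 9 5 = 1 from by decide,
      show PySem.Int.floordiv 10 5 = 2 from by decide,
      show PySem.Int.floordiv 11 5 = 2 from by decide,
      show PySem.Int.floordiv 12 5 = 2 from by decide,
      show PySem.Int.floordiv 13 5 = 2 from by decide,
      show PySem.Int.floordiv 14 5 = 2 from by decide,
      show PySem.Int.floordiv 15 5 = 3 from by decide,
      show PySem.Int.floordiv 16 5 = 3 from by decide,
      show PySem.Int.floordiv 17 5 = 3 from by decide,
      show PySem.Int.floordiv 18 5 = 3 from by decide,
      show PySem.Int.floordiv 19 5 = 3 from by decide,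
      Int.reduceAdd]
    norm_num [aux_from_four]
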